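-- pv_equiv track=rewrite | github.com/jaycob24/Homeworkes | lab_3.py | Third
-- ===== SOURCE A (Python) =====
-- def Third(s):
--   d = {}
--   newS = ""
--   for c in s:
--     if c.isalpha() or c.isspace():
--       newS += c
--   words = newS.lower().split()
--   for word in words:
--     if word not in d:
--       d.setdefault(word, 1)
--     else: d[word] += 1
--   minValue = d[min(d, key=d.get)]
--   minWords = [k for k, v in d.items() if v == minValue]
--   return sorted(minWords)[0]
-- ===== SOURCE B (Python) =====
-- def Third(s):
--     # One pass over the characters tokenizes directly (letters are kept lowercased,
--     # whitespace ends the current word, everything else is dropped without ending it),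
--     # then the words are counted, and one min() over a composite (count, word) key
--     # replaces A's minValue / minWords / sort selection.
--     words = []
--     cur = []
--     for c in s:
--         if c.isalpha():
--             cur.append(c.lower())
--         elif c.isspace():
--             if cur:
--                 words.append(''.join(cur))
--                 cur = []
--     if cur:
--         words.append(''.join(cur))
--     counts = {}
--     for w in words:
--         counts[w] = counts.get(w, 0) + 1
--     return min(counts.items(), key=lambda p: (p[1], p[0]))[0]
-- ===== Notes on version B (the rewrite author's own statement) =====
-- stated objective: alternative
-- what changed: B tokenizes in a single pass over the characters (lowercasing letters and flushing words at whitespace) instead of building a filtered string and calling lower().split(), counts with dict.get, and selects the answer with one min() over a composite (count, word) key instead of A's three-step minValue / minWords / sorted()[0] selection.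
import Mathlib
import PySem

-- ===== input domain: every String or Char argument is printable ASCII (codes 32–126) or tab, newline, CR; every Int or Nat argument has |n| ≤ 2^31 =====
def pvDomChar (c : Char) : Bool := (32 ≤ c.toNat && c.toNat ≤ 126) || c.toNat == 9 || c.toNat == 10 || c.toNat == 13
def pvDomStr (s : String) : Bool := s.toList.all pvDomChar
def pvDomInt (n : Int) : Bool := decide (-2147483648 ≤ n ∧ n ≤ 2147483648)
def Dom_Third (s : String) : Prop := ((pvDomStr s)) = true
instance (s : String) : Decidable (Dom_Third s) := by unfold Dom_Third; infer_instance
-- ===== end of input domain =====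

-- B replaces A's filter/lower/split + setdefault counting + (min over values, filter, sort, index)
-- pipeline by a one-pass tokenizer and a single min over a composite (count, word) key; objective: simpler.

-- ===== PORT A =====
def Third (s : String) : String :=
  -- d = {}; newS = ""; for c in s: if c.isalpha() or c.isspace(): newS += c
  let newS : List Char := s.toList.foldl
    (fun acc c => if PySem.Chars.isalpha c || PySem.Chars.isspace c then acc ++ [c] else acc) []
  -- words = newS.lower().split()
  let words : List (List Char) := PySem.Chars.split₀ (PySem.Chars.lower newS)
  -- for word in words: if word not in d: d.setdefault(word, 1) else: d[word] += 1
  let d : PySem.Dict (List Char) Int := words.foldl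
    (fun d w => if d.contains w = false then d.setdefault w 1 else d.insert w (d.getD w 0 + 1))
    PySem.Dict.empty
  -- minValue = d[min(d, key=d.get)]  (every key of d is present, so d.get(k) is its count: getD k 0 is exact)
  match PySem.List.min? d.keys (fun k => d.getD k 0) with
  | none => ""        -- Python: min() of an empty dict raises ValueError; excluded by Pre_Third
  | some m =>
    let minValue : Int := d.getD m 0
    -- minWords = [k for k, v in d.items() if v == minValue]
    let minWords : List (List Char) := (d.items.filter (fun p => p.2 == minValue)).map (fun p => p.1)
    -- return sorted(minWords)[0]
    match PySem.List.pyGet? (PySem.List.sorted minWords (fun w => String.mk w)) 0 with  -- Python compares the words as strings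
    | none => ""      -- IndexError; unreachable (minWords is nonempty whenever d is)
    | some w => String.mk w

-- ===== PORT B =====
def pvStep (st : List (List Char) × List Char) (c : Char) : List (List Char) × List Char :=
  if PySem.Chars.isalpha c then (st.1, st.2 ++ [PySem.Chars.lowerChar c])
  else if PySem.Chars.isspace c then (if st.2.isEmpty then st else (st.1 ++ [st.2], []))
  else st

def pvFlush (st : List (List Char) × List Char) : List (List Char) :=
  if st.2.isEmpty then st.1 else st.1 ++ [st.2]

def Third_alt (s : String) : String :=
  -- one pass: letters extend the current word (lowercased), whitespace flushes it
  let words : List (List Char) := pvFlush (s.toList.foldl pvStep ([], []))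
  -- counts[w] = counts.get(w, 0) + 1
  let counts : PySem.Dict (List Char) Int := words.foldl
    (fun d w => d.insert w (d.getD w 0 + 1)) PySem.Dict.empty
  -- return min(counts.items(), key=lambda p: (p[1], p[0]))[0]
  match PySem.List.min2? counts.items (fun p => p.2) (fun p => String.mk p.1) with
  | none => ""        -- Python: min() of an empty sequence raises ValueError; excluded by Pre_Third
  | some q => String.mk q.1

-- ===== PRECONDITION & SPEC =====
-- Pre_ excludes exactly the strings with no alphabetic character: there A's min() over the
-- empty dict raises ValueError (and B's min() over the empty items raises ValueError too).
def Pre_Third (s : String) : Prop := s.toList.any PySem.Chars.isalpha = true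
instance (s : String) : Decidable (Pre_Third s) := by unfold Pre_Third; infer_instance
def pvWitness_Third : String := "if b or not b ."

def Spec_Third (s : String) (out : String) : Prop := out = Third_alt s
instance (s : String) (out : String) : Decidable (Spec_Third s out) := by unfold Spec_Third; infer_instance

-- ===== CLAIM (what is proved, stated in full; the proofs are below) =====
def Claim_equal_Third : Prop := ∀ (s : String), Dom_Third s → Pre_Third s → Spec_Third s (Third s)

-- ===== LEMMAS AND PROOFS =====

-- character-level facts
theorem pv_alpha_not_space (c : Char) (h : PySem.Chars.isalpha c = true) :
    PySem.Chars.isspace c = false := by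
  have hA : 'A'.val.toNat = 65 := by decide
  have hZ : 'Z'.val.toNat = 90 := by decide
  have ha : 'a'.val.toNat = 97 := by decide
  have hz : 'z'.val.toNat = 122 := by decide
  simp only [PySem.Chars.isalpha, PySem.Chars.isupper, PySem.Chars.islower, Bool.or_eq_true,
    Bool.and_eq_true, decide_eq_true_eq, Char.le_def, UInt32.le_iff_toNat_le, hA, hZ, ha, hz] at h
  simp only [PySem.Chars.isspace, Char.toNat]
  simp only [Bool.or_eq_false_iff, Bool.and_eq_false_iff, decide_eq_false_iff_not]
  omega

theorem pv_toNat_ofNat (n : Nat) (h : n.isValidChar) : (Char.ofNat n).toNat = n := by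
  simp only [Char.ofNat, dif_pos h]
  simp only [Char.ofNatAux, Char.toNat]
  rcases h with h | ⟨h1, h2⟩ <;> simp

theorem pv_lowerChar_toNat (c : Char) (h : PySem.Chars.isupper c = true) :
    (PySem.Chars.lowerChar c).toNat = c.toNat + 32 := by
  have hA : 'A'.val.toNat = 65 := by decide
  have hZ : 'Z'.val.toNat = 90 := by decide
  have h' := h
  simp only [PySem.Chars.isupper, Bool.and_eq_true, decide_eq_true_eq, Char.le_def,
    UInt32.le_iff_toNat_le, hA, hZ] at h'
  have hv : (c.toNat + 32).isValidChar := by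
    left
    simp only [Char.toNat] at *
    omega
  rw [show PySem.Chars.lowerChar c = Char.ofNat (c.toNat + 32) from by
    simp [PySem.Chars.lowerChar, h]]
  exact pv_toNat_ofNat _ hv

theorem pv_alpha_lower_not_space (c : Char) (h : PySem.Chars.isalpha c = true) :
    PySem.Chars.isspace (PySem.Chars.lowerChar c) = false := by
  by_cases hu : PySem.Chars.isupper c = true
  · have ht := pv_lowerChar_toNat c hu
    have hA : 'A'.val.toNat = 65 := by decide
    have hZ : 'Z'.val.toNat = 90 := by decide
    simp only [PySem.Chars.isupper, Bool.and_eq_true, decide_eq_true_eq, Char.le_def,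
      UInt32.le_iff_toNat_le, hA, hZ] at hu
    simp only [PySem.Chars.isspace, Char.toNat] at *
    simp only [Bool.or_eq_false_iff, Bool.and_eq_false_iff, decide_eq_false_iff_not]
    omega
  · have heq : PySem.Chars.lowerChar c = c := by simp [PySem.Chars.lowerChar, hu]
    rw [heq]
    exact pv_alpha_not_space c h

theorem pv_space_lowerChar (c : Char) (h : PySem.Chars.isspace c = true) :
    PySem.Chars.lowerChar c = c := by
  have hA : 'A'.val.toNat = 65 := by decide
  have hZ : 'Z'.val.toNat = 90 := by decide
  have hu : PySem.Chars.isupper c = false := by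
    simp only [PySem.Chars.isspace, Char.toNat, Bool.or_eq_true, Bool.and_eq_true,
      decide_eq_true_eq] at h
    simp only [PySem.Chars.isupper, Bool.and_eq_false_iff, decide_eq_false_iff_not, Char.le_def,
      UInt32.le_iff_toNat_le, hA, hZ]
    omega
  simp [PySem.Chars.lowerChar, hu]

-- split₀.go, one step at a time
theorem pv_go_nil (cur : List Char) (acc : List (List Char)) :
    PySem.Chars.split₀.go [] cur acc
      = if cur.isEmpty then acc.reverse else (cur.reverse :: acc).reverse := rfl

theorem pv_go_cons_space (c : Char) (rest cur : List Char) (acc : List (List Char))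
    (h : PySem.Chars.isspace c = true) :
    PySem.Chars.split₀.go (c :: rest) cur acc
      = if cur.isEmpty then PySem.Chars.split₀.go rest [] acc
        else PySem.Chars.split₀.go rest [] (cur.reverse :: acc) := by
  conv_lhs => rw [PySem.Chars.split₀.go]
  simp [h]

theorem pv_go_cons_nospace (c : Char) (rest cur : List Char) (acc : List (List Char))
    (h : PySem.Chars.isspace c = false) :
    PySem.Chars.split₀.go (c :: rest) cur acc
      = PySem.Chars.split₀.go rest (c :: cur) acc := by
  conv_lhs => rw [PySem.Chars.split₀.go]
  simp [h]

-- the tokenizer invariant: B's one-pass scan computes split() of lower() of the filtered text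
theorem pv_words_go (cs : List Char) : ∀ (ws : List (List Char)) (cur : List Char),
    pvFlush (cs.foldl pvStep (ws, cur)) =
      PySem.Chars.split₀.go
        (PySem.Chars.lower (cs.filter (fun c => PySem.Chars.isalpha c || PySem.Chars.isspace c)))
        cur.reverse ws.reverse := by
  induction cs with
  | nil =>
    intro ws cur
    simp only [List.foldl_nil, List.filter_nil, PySem.Chars.lower, List.map_nil, pv_go_nil]
    cases cur <;> simp [pvFlush]
  | cons c rest ih =>
    intro ws cur
    by_cases ha : PySem.Chars.isalpha c = true
    · rw [List.foldl_cons]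
      have hstep : pvStep (ws, cur) c = (ws, cur ++ [PySem.Chars.lowerChar c]) := by
        simp [pvStep, ha]
      rw [hstep, List.filter_cons_of_pos (by simp [ha])]
      simp only [PySem.Chars.lower, List.map_cons]
      rw [pv_go_cons_nospace _ _ _ _ (pv_alpha_lower_not_space c ha)]
      rw [ih ws (cur ++ [PySem.Chars.lowerChar c])]
      simp [PySem.Chars.lower]
    · by_cases hs : PySem.Chars.isspace c = true
      · rw [List.foldl_cons]
        rw [List.filter_cons_of_pos (by simp [hs])]
        simp only [PySem.Chars.lower, List.map_cons, pv_space_lowerChar c hs]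
        rw [pv_go_cons_space _ _ _ _ hs]
        by_cases hc : cur = []
        · subst hc
          have hstep : pvStep (ws, ([] : List Char)) c = (ws, []) := by
            simp [pvStep, ha, hs]
          rw [hstep, ih ws []]
          simp [PySem.Chars.lower]
        · have hstep : pvStep (ws, cur) c = (ws ++ [cur], []) := by
            simp [pvStep, ha, hs, List.isEmpty_iff, hc]
          rw [hstep, ih (ws ++ [cur]) []]
          simp [PySem.Chars.lower, List.isEmpty_iff, hc]
      · rw [List.foldl_cons]
        have hstep : pvStep (ws, cur) c = (ws, cur) := by simp [pvStep, ha, hs]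
        rw [hstep, List.filter_cons_of_neg (by simp [ha, hs])]
        exact ih ws cur

theorem pv_words_eq (cs : List Char) :
    pvFlush (cs.foldl pvStep ([], [])) =
      PySem.Chars.split₀
        (PySem.Chars.lower (cs.filter (fun c => PySem.Chars.isalpha c || PySem.Chars.isspace c))) := by
  rw [pv_words_go cs [] []]
  rfl

-- nonemptiness under Pre_
theorem pv_words_ne_nil (cs : List Char) : ∀ (ws : List (List Char)) (cur : List Char),
    (cs.any PySem.Chars.isalpha = true ∨ ws ≠ [] ∨ cur ≠ []) →
    pvFlush (cs.foldl pvStep (ws, cur)) ≠ [] := by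
  induction cs with
  | nil =>
    intro ws cur h
    simp only [List.any_nil] at h
    rcases h with h | h | h
    · exact absurd h (by simp)
    · cases cur <;> simp [pvFlush, List.foldl_nil] <;> simp_all
    · cases cur <;> simp [pvFlush, List.foldl_nil] <;> simp_all
  | cons c rest ih =>
    intro ws cur h
    rw [List.foldl_cons]
    by_cases ha : PySem.Chars.isalpha c = true
    · have hstep : pvStep (ws, cur) c = (ws, cur ++ [PySem.Chars.lowerChar c]) := by
        simp [pvStep, ha]
      rw [hstep]
      exact ih ws _ (Or.inr (Or.inr (by simp)))
    · have h' : rest.any PySem.Chars.isalpha = true ∨ ws ≠ [] ∨ cur ≠ [] := by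
        rcases h with h | h
        · rw [List.any_cons] at h
          rcases Bool.or_eq_true_iff.mp h with h | h
          · exact absurd h ha
          · exact Or.inl h
        · exact Or.inr h
      by_cases hs : PySem.Chars.isspace c = true
      · by_cases hc : cur = []
        · subst hc
          have hstep : pvStep (ws, ([] : List Char)) c = (ws, []) := by simp [pvStep, ha, hs]
          rw [hstep]
          exact ih ws [] h'
        · have hstep : pvStep (ws, cur) c = (ws ++ [cur], []) := by
            simp [pvStep, ha, hs, List.isEmpty_iff, hc]
          rw [hstep]
          exact ih _ _ (Or.inr (Or.inl (by simp)))
      · have hstep : pvStep (ws, cur) c = (ws, cur) := by simp [pvStep, ha, hs]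
        rw [hstep]
        exact ih ws cur h'

-- both counting loops build Counter(words)
theorem pv_countB (ws : List (List Char)) :
    ws.foldl (fun d w => d.insert w (d.getD w 0 + 1)) PySem.Dict.empty
      = PySem.Dict.counter ws :=
  PySem.Dict.foldl_insert_getD_add_one_eq_counter ws

theorem pv_countA (ws : List (List Char)) :
    ws.foldl (fun d w => if d.contains w = false then d.setdefault w 1
                         else d.insert w (d.getD w 0 + 1)) PySem.Dict.empty
      = PySem.Dict.counter ws := by
  rw [← pv_countB]
  apply PySem.List.foldl_congr_mem
  intro acc w _
  by_cases hc : acc.contains w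
  · simp [hc]
  · have hc' : acc.contains w = false := by simpa using hc
    rw [if_pos hc', PySem.Dict.setdefault_of_not_contains acc 1 hc',
      PySem.Dict.getD_of_not_contains acc 0 hc']
    norm_num

-- minimality of min2? (the prelude has no order lemma for min2?, so it is proved here)
def pvSel {α : Type} (k1 : α → Int) (k2 : α → String) : Option α → α → Option α :=
  fun acc x => match acc with
    | none => some x
    | some m => if (decide (k1 x < k1 m) || (!decide (k1 m < k1 x) && decide (k2 x < k2 m))) = true
                then some x else some m

theorem pv_min2?_eq_foldl {α : Type} (k1 : α → Int) (k2 : α → String) (xs : List α) :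
    PySem.List.min2? xs k1 k2 = xs.foldl (pvSel k1 k2) none := by
  unfold PySem.List.min2?
  exact PySem.List.foldl_congr_mem _ _ _ _ (fun acc x _ => by cases acc <;> rfl)

theorem pv_lexle_trans {α : Type} (k1 : α → Int) (k2 : α → String) {a b c : α}
    (h1 : k1 a < k1 b ∨ (k1 a = k1 b ∧ k2 a ≤ k2 b))
    (h2 : k1 b < k1 c ∨ (k1 b = k1 c ∧ k2 b ≤ k2 c)) :
    k1 a < k1 c ∨ (k1 a = k1 c ∧ k2 a ≤ k2 c) := by
  rcases h1 with h1 | ⟨e1, l1⟩ <;> rcases h2 with h2 | ⟨e2, l2⟩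
  · exact Or.inl (lt_trans h1 h2)
  · exact Or.inl (by omega)
  · exact Or.inl (by omega)
  · exact Or.inr ⟨by omega, le_trans l1 l2⟩

theorem pv_sel_lexle {α : Type} (k1 : α → Int) (k2 : α → String) {x a : α}
    (hb : (decide (k1 x < k1 a) || (!decide (k1 a < k1 x) && decide (k2 x < k2 a))) = true) :
    k1 x < k1 a ∨ (k1 x = k1 a ∧ k2 x ≤ k2 a) := by
  by_cases hlt : k1 x < k1 a
  · exact Or.inl hlt
  · simp only [hlt, decide_false, Bool.false_or, Bool.and_eq_true, Bool.not_eq_eq_eq_not,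
      Bool.not_true, decide_eq_true_eq, decide_eq_false_iff_not] at hb
    obtain ⟨hb1, hb2⟩ := hb
    exact Or.inr ⟨by omega, le_of_lt hb2⟩

theorem pv_sel_lexle' {α : Type} (k1 : α → Int) (k2 : α → String) {x a : α}
    (hb : ¬ (decide (k1 x < k1 a) || (!decide (k1 a < k1 x) && decide (k2 x < k2 a))) = true) :
    k1 a < k1 x ∨ (k1 a = k1 x ∧ k2 a ≤ k2 x) := by
  by_cases hlt : k1 a < k1 x
  · exact Or.inl hlt
  · have h1 : ¬ k1 x < k1 a := fun h => hb (by simp [h])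
    have h2 : ¬ k2 x < k2 a := fun h => hb (by simp [hlt, h])
    exact Or.inr ⟨by omega, le_of_not_gt h2⟩

theorem pv_min2_aux {α : Type} (k1 : α → Int) (k2 : α → String) (xs : List α) :
    ∀ (a m : α), xs.foldl (pvSel k1 k2) (some a) = some m →
      (m = a ∨ m ∈ xs) ∧ ∀ y, (y = a ∨ y ∈ xs) → k1 m < k1 y ∨ (k1 m = k1 y ∧ k2 m ≤ k2 y) := by
  induction xs with
  | nil =>
    intro a m h
    simp only [List.foldl_nil, Option.some.injEq] at h
    subst h
    refine ⟨Or.inl rfl, ?_⟩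
    rintro y (rfl | hy)
    · exact Or.inr ⟨rfl, le_refl _⟩
    · simp at hy
  | cons x xs ih =>
    intro a m h
    rw [List.foldl_cons] at h
    have hsel : pvSel k1 k2 (some a) x
        = if (decide (k1 x < k1 a) || (!decide (k1 a < k1 x) && decide (k2 x < k2 a))) = true
          then some x else some a := rfl
    by_cases hb : (decide (k1 x < k1 a) || (!decide (k1 a < k1 x) && decide (k2 x < k2 a))) = true
    · rw [hsel, if_pos hb] at h
      obtain ⟨hm, hmin⟩ := ih x m h
      refine ⟨?_, ?_⟩
      · rcases hm with rfl | hm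
        · exact Or.inr (List.mem_cons_self)
        · exact Or.inr (List.mem_cons_of_mem _ hm)
      · rintro y (rfl | hy)
        · exact pv_lexle_trans k1 k2 (hmin x (Or.inl rfl)) (pv_sel_lexle k1 k2 hb)
        · rcases List.mem_cons.mp hy with rfl | hy
          · exact hmin y (Or.inl rfl)
          · exact hmin y (Or.inr hy)
    · rw [hsel, if_neg hb] at h
      obtain ⟨hm, hmin⟩ := ih a m h
      refine ⟨?_, ?_⟩
      · rcases hm with rfl | hm
        · exact Or.inl rfl
        · exact Or.inr (List.mem_cons_of_mem _ hm)
      · rintro y (rfl | hy)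
        · exact hmin y (Or.inl rfl)
        · rcases List.mem_cons.mp hy with rfl | hy
          · exact pv_lexle_trans k1 k2 (hmin a (Or.inl rfl)) (pv_sel_lexle' k1 k2 hb)
          · exact hmin y (Or.inr hy)

theorem pv_min2_some {α : Type} (k1 : α → Int) (k2 : α → String) (xs : List α) :
    ∀ (a : α), ∃ m, xs.foldl (pvSel k1 k2) (some a) = some m := by
  induction xs with
  | nil => intro a; exact ⟨a, rfl⟩
  | cons x xs ih =>
    intro a
    rw [List.foldl_cons]
    by_cases hb : (decide (k1 x < k1 a) || (!decide (k1 a < k1 x) && decide (k2 x < k2 a))) = true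
    · rw [show pvSel k1 k2 (some a) x = some x from if_pos hb]
      exact ih x
    · rw [show pvSel k1 k2 (some a) x = some a from if_neg hb]
      exact ih a

theorem pv_min2_spec {α : Type} (k1 : α → Int) (k2 : α → String) (xs : List α) (m : α)
    (h : PySem.List.min2? xs k1 k2 = some m) :
    m ∈ xs ∧ ∀ y ∈ xs, k1 m < k1 y ∨ (k1 m = k1 y ∧ k2 m ≤ k2 y) := by
  cases xs with
  | nil => simp [pv_min2?_eq_foldl] at h
  | cons x xs =>
    rw [pv_min2?_eq_foldl, List.foldl_cons] at h
    rw [show pvSel k1 k2 none x = some x from rfl] at h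
    obtain ⟨hm, hmin⟩ := pv_min2_aux k1 k2 xs x m h
    refine ⟨?_, ?_⟩
    · rcases hm with rfl | hm
      · exact List.mem_cons_self
      · exact List.mem_cons_of_mem _ hm
    · intro y hy
      rcases List.mem_cons.mp hy with rfl | hy
      · exact hmin y (Or.inl rfl)
      · exact hmin y (Or.inr hy)

theorem pv_min2_exists {α : Type} (k1 : α → Int) (k2 : α → String) (xs : List α)
    (h : xs ≠ []) : ∃ m, PySem.List.min2? xs k1 k2 = some m := by
  cases xs with
  | nil => exact absurd rfl h
  | cons x xs =>
    rw [pv_min2?_eq_foldl, List.foldl_cons]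
    rw [show pvSel k1 k2 none x = some x from rfl]
    exact pv_min2_some k1 k2 xs x

-- ===== VERDICT (by name: the statement is the Claim_ definition above) =====
theorem Third_spec : Claim_equal_Third := by
  intro s _ hpre
  show Third s = Third_alt s
  simp only [Third, Third_alt]
  rw [PySem.List.foldl_append_if_eq_filter, List.nil_append, pv_words_eq]
  set W := PySem.Chars.split₀
    (PySem.Chars.lower (s.toList.filter (fun c => PySem.Chars.isalpha c || PySem.Chars.isspace c)))
    with hWdef
  rw [pv_countA W, pv_countB W]
  have hne : W ≠ [] := by
    rw [hWdef, ← pv_words_eq]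
    exact pv_words_ne_nil s.toList [] [] (Or.inl hpre)
  have hkeys := PySem.Dict.keys_counter W
  have hitems := PySem.Dict.items_counter W
  have hKne : PySem.Set.ofList W ≠ [] := by
    intro h0
    apply hne
    cases hW2 : W with
    | nil => rfl
    | cons w t =>
      have hw : w ∈ PySem.Set.ofList W := (PySem.Set.mem_ofList _ w).mpr (by rw [hW2]; simp)
      rw [h0] at hw
      simp at hw
  cases hm : PySem.List.min? (PySem.Dict.counter W).keys
      (fun k => (PySem.Dict.counter W).getD k 0) with
  | none =>
    exfalso
    rw [PySem.List.min?_eq_none_iff, hkeys] at hm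
    exact hKne hm
  | some m =>
  show (match PySem.List.pyGet? (PySem.List.sorted
        (((PySem.Dict.counter W).items.filter
          (fun p => p.2 == (PySem.Dict.counter W).getD m 0)).map (fun p => p.1))
        (fun w => String.mk w)) 0 with
    | none => ""
    | some w => String.mk w)
    = match PySem.List.min2? (PySem.Dict.counter W).items (fun p => p.2) (fun p => String.mk p.1) with
      | none => ""
      | some q => String.mk q.1
  have hmW : m ∈ W := by
    have := PySem.List.min?_mem hm
    rw [hkeys, PySem.Set.mem_ofList] at this
    exact this
  have hmin : ∀ k ∈ W, W.count m ≤ W.count k := by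
    intro k hk
    have := PySem.List.min?_isMin hm k (by rw [hkeys, PySem.Set.mem_ofList]; exact hk)
    simpa [PySem.Dict.getD_counter] using this
  have hminw : ((PySem.Dict.counter W).items.filter
        (fun p => p.2 == (PySem.Dict.counter W).getD m 0)).map (fun p => p.1)
      = (PySem.Set.ofList W).filter (fun k => ((W.count k : Int) == (W.count m : Int))) := by
    rw [hitems, PySem.Dict.getD_counter, List.filter_map, List.map_map]
    first
    | rfl
    | simp [Function.comp]
    | simp [Function.comp_def]
  rw [hminw]
  set MW := (PySem.Set.ofList W).filter (fun k => ((W.count k : Int) == (W.count m : Int)))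
    with hMWdef
  have hmMW : m ∈ MW := by
    rw [hMWdef, List.mem_filter]
    exact ⟨(PySem.Set.mem_ofList _ m).mpr hmW, by simp⟩
  have hMWne : MW ≠ [] := List.ne_nil_of_mem hmMW
  cases hget : PySem.List.pyGet? (PySem.List.sorted MW (fun w => String.mk w)) 0 with
  | none =>
    exfalso
    cases hS : PySem.List.sorted MW (fun w => String.mk w) with
    | nil =>
      rw [PySem.List.sorted_eq_nil_iff] at hS
      exact hMWne hS
    | cons b t =>
      rw [hS, PySem.List.pyGet?_zero_cons] at hget
      simp at hget
  | some a =>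
  show String.mk a
    = match PySem.List.min2? (PySem.Dict.counter W).items (fun p => p.2) (fun p => String.mk p.1) with
      | none => ""
      | some q => String.mk q.1
  -- a is the head of sorted(MW)
  have haMW : a ∈ MW := by
    have : a ∈ PySem.List.sorted MW (fun w => String.mk w) := by
      cases hS : PySem.List.sorted MW (fun w => String.mk w) with
      | nil =>
        rw [PySem.List.sorted_eq_nil_iff] at hS
        exact absurd hS hMWne
      | cons b t =>
        rw [hS, PySem.List.pyGet?_zero_cons] at hget
        simp only [Option.some.injEq] at hget
        subst hget
        exact List.mem_cons_self
    exact (PySem.List.sorted_perm MW (fun w => String.mk w) false).subset this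
  have hamin : ∀ y ∈ MW, String.mk a ≤ String.mk y := by
    cases hS : PySem.List.sorted MW (fun w => String.mk w) with
    | nil =>
      rw [PySem.List.sorted_eq_nil_iff] at hS
      exact absurd hS hMWne
    | cons b t =>
      have hba : b = a := by
        rw [hS, PySem.List.pyGet?_zero_cons] at hget
        simpa using hget
      subst hba
      exact PySem.List.key_head_sorted_le MW (fun w => String.mk w) hS
  have haK : a ∈ W := by
    rw [hMWdef, List.mem_filter] at haMW
    exact (PySem.Set.mem_ofList _ a).mp haMW.1
  have hacnt : W.count a = W.count m := by
    rw [hMWdef, List.mem_filter] at haMW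
    have := haMW.2
    simp only [beq_iff_eq, Int.natCast_inj] at this
    exact this
  cases hq : PySem.List.min2? (PySem.Dict.counter W).items (fun p => p.2) (fun p => String.mk p.1) with
  | none =>
    exfalso
    obtain ⟨q0, hq0⟩ := pv_min2_exists (fun p => p.2) (fun p => String.mk p.1)
      (PySem.Dict.counter W).items (by
        rw [hitems]
        intro h0
        rw [List.map_eq_nil_iff] at h0
        exact hKne h0)
    rw [hq0] at hq
    simp at hq
  | some q =>
  show String.mk a = String.mk q.1
  obtain ⟨hqmem, hqmin⟩ := pv_min2_spec _ _ _ _ hq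
  rw [hitems] at hqmem
  obtain ⟨k0, hk0K, hk0eq⟩ := List.mem_map.mp hqmem
  have hk0W : k0 ∈ W := (PySem.Set.mem_ofList _ k0).mp hk0K
  have hq1 : q.1 = k0 := by rw [← hk0eq]
  have hq2 : q.2 = (W.count k0 : Int) := by rw [← hk0eq]
  have haitem : ((a, (W.count a : Int)) : List Char × Int) ∈ (PySem.Dict.counter W).items := by
    rw [hitems]
    exact List.mem_map.mpr ⟨a, (PySem.Set.mem_ofList _ a).mpr haK, rfl⟩
  have hcmp := hqmin _ haitem
  simp only at hcmp
  have hge : (W.count m : Int) ≤ q.2 := by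
    rw [hq2]
    exact_mod_cast hmin k0 hk0W
  rcases hcmp with hlt | ⟨heq, hle⟩
  · exfalso
    rw [hacnt] at hlt
    omega
  · have hk0cnt : W.count k0 = W.count m := by
      rw [hq2] at heq
      rw [hacnt] at heq
      exact_mod_cast heq
    have hk0MW : q.1 ∈ MW := by
      rw [hq1, hMWdef, List.mem_filter]
      exact ⟨(PySem.Set.mem_ofList _ k0).mpr hk0W, by simp [hk0cnt]⟩
    have h1 : String.mk a ≤ String.mk q.1 := hamin _ hk0MW
    have h2 : String.mk q.1 ≤ String.mk a := hle
    exact le_antisymm h1 h2
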